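-- pv_equiv track=rewrite | github.com/JawadGigyani/Advent-of-Code---2025 | Day 6 - Trash Compactor/main.py | parse_problems_from_transposed
-- ===== SOURCE A (Python) =====
-- def parse_problems_from_transposed(lines):
--     maxlen = max(len(line) for line in lines)
--     padded = [line.ljust(maxlen) for line in lines]
--     columns = [''.join(row[i] for row in padded) for i in range(maxlen)]
--
--     problems = []
--     i = 0
--     while i < len(columns):
--         if all(c == ' ' for c in columns[i]):
--             i += 1
--             continue
--         start = i
--         while i < len(columns) and not all(c == ' ' for c in columns[i]):
--             i += 1
--         end = i
--         problems.append(columns[start:end])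
--     return problems
-- ===== SOURCE B (Python) =====
-- def parse_problems_from_transposed(lines):
--     maxlen = max((len(line) for line in lines), default=0)
--     columns = [''.join(line[i] if i < len(line) else ' ' for line in lines)
--                for i in range(maxlen)]
--     seps = [i for i, col in enumerate(columns) if all(c == ' ' for c in col)]
--     bounds = zip([-1] + seps, seps + [maxlen])
--     return [columns[a + 1:b] for a, b in bounds if b - a > 1]
-- ===== Notes on version B (the rewrite author's own statement) =====
-- stated objective: simpler
-- what changed: B drops the padding pass and the interleaved nested while-loops: it computes the list of blank-column indices once, pairs consecutive separators (with -1/maxlen sentinels) via zip, and emits each problem as the slice columns[a+1:b] between them, filtering the empty gaps.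
import Mathlib
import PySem

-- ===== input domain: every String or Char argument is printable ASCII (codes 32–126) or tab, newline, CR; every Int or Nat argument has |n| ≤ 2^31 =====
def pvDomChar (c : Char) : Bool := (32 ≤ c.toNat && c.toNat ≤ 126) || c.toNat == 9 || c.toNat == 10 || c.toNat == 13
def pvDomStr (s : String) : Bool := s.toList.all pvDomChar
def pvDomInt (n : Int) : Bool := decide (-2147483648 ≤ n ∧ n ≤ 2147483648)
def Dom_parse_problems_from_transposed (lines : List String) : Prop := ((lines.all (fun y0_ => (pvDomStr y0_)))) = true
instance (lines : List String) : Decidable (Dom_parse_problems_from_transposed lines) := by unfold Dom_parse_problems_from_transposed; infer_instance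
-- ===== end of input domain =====

-- B computes the blank-column index list once and slices columns between consecutive separators
-- (with -1/maxlen sentinels), instead of A's interleaved nested while-loops; objective: simpler, same cost.


-- ===== PORT A =====
-- all(c == ' ' for c in s)
def pvAllSpace (s : String) : Bool := s.toList.all (fun c => c == ' ')

-- line.ljust(maxlen)
def pvLjust (n : Nat) (l : List Char) : List Char := l ++ List.replicate (n - l.length) ' '

-- A's outer while; the inner while (scan to the end of the non-blank run) is take/drop of that run
def pvLoopA : List String → List (List String)
  | [] => []
  | c :: rest =>
    if pvAllSpace c then pvLoopA rest
    else (c :: rest.takeWhile (fun d => !pvAllSpace d)) ::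
          pvLoopA (rest.dropWhile (fun d => !pvAllSpace d))
termination_by cols => cols.length
decreasing_by
  · simp only [List.length_cons]; omega
  · simp only [List.length_cons]; exact Nat.lt_succ_of_le (List.length_dropWhile_le _ _)

-- row[i] is always in range here (padded rows have length ≥ maxlen), so getD's default is never taken
def parse_problems_from_transposed (lines : List String) : List (List String) :=
  let maxlen := ((lines.map (fun l => l.toList.length)).max?).getD 0
  let padded := lines.map (fun l => pvLjust maxlen l.toList)
  let columns := (List.range maxlen).map (fun i => String.ofList (padded.map (fun row => row.getD i ' ')))
  pvLoopA columns

-- ===== PORT B =====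
def parse_problems_from_transposed_alt (lines : List String) : List (List String) :=
  let maxlen := ((lines.map (fun l => l.toList.length)).max?).getD 0
  let columns := (List.range maxlen).map (fun i => String.ofList (lines.map (fun l => if i < l.toList.length then l.toList.getD i ' ' else ' ')))
  let seps := ((PySem.List.enumerate columns 0).filter (fun p => pvAllSpace p.2)).map (fun p => p.1)
  let bounds := List.zip ((-1) :: seps) (seps ++ [(maxlen : Int)])
  (bounds.filter (fun p => decide (p.2 - p.1 > 1))).map (fun p => PySem.List.slice columns (some (p.1 + 1)) (some p.2))

-- ===== PRECONDITION & SPEC =====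
-- Pre_ excludes only the empty list of lines, on which A's max() raises ValueError (B returns [] there).
def Pre_parse_problems_from_transposed (lines : List String) : Prop := lines ≠ []
instance (lines : List String) : Decidable (Pre_parse_problems_from_transposed lines) := by
  unfold Pre_parse_problems_from_transposed; infer_instance
def pvWitness_parse_problems_from_transposed : List String := ["ab", " c"]

def Spec_parse_problems_from_transposed (lines : List String) (out : List (List String)) : Prop :=
  out = parse_problems_from_transposed_alt lines
instance (lines : List String) (out : List (List String)) :
    Decidable (Spec_parse_problems_from_transposed lines out) := by
  unfold Spec_parse_problems_from_transposed; infer_instance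

-- ===== CLAIM (what is proved, stated in full; the proofs are below) =====
def Claim_equal_parse_problems_from_transposed : Prop :=
  ∀ (lines : List String), Dom_parse_problems_from_transposed lines →
    Pre_parse_problems_from_transposed lines →
    Spec_parse_problems_from_transposed lines (parse_problems_from_transposed lines)

-- ===== LEMMAS AND PROOFS =====

-- reference segmentation for A: pvG run cols = the problems still to be produced given the pending run
def pvG : List String → List String → List (List String)
  | run, [] => if run.isEmpty then [] else [run]
  | run, c :: cs =>
    if pvAllSpace c then (if run.isEmpty then pvG [] cs else run :: pvG [] cs)
    else pvG (run ++ [c]) cs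

lemma pvLoopA_eq_pvG_aux (cs : List String) : ∀ run : List String, run ≠ [] →
    pvG run cs = (run ++ cs.takeWhile (fun d => !pvAllSpace d)) ::
                  pvG [] (cs.dropWhile (fun d => !pvAllSpace d)) := by
  induction cs with
  | nil => intro run h; simp [pvG, h]
  | cons d ds ih =>
    intro run h
    by_cases hd : pvAllSpace d = true
    · simp [pvG, hd, h, List.isEmpty_iff, List.takeWhile, List.dropWhile]
    · simp only [pvG, hd, Bool.false_eq_true, if_false]
      rw [ih (run ++ [d]) (by simp)]
      simp [hd]

lemma pvLoopA_eq_pvG (cols : List String) : pvLoopA cols = pvG [] cols := by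
  induction cols using pvLoopA.induct with
  | case1 => simp [pvLoopA, pvG]
  | case2 c rest hc ih => simp [pvLoopA, pvG, hc, ih]
  | case3 c rest hc ih =>
    simp only [pvLoopA, hc, Bool.false_eq_true, if_false]
    simp only [pvG, hc, Bool.false_eq_true, if_false, List.nil_append]
    rw [pvLoopA_eq_pvG_aux rest [c] (by simp)]
    simp [ih]

lemma pvModifyHead_comp {α : Type} (f g : List α → List α) (l : List (List α)) :
    (l.modifyHead f).modifyHead g = l.modifyHead (fun x => g (f x)) := by
  cases l <;> simp

lemma pvModifyHead_nil {α : Type} (l : List (List α)) :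
    l.modifyHead (fun g => [] ++ g) = l := by
  cases l <;> simp

lemma pvG_split (cols : List String) : ∀ run,
    pvG run cols = ((cols.splitOnP pvAllSpace).modifyHead (fun g => run ++ g)).filter
      (fun g => !g.isEmpty) := by
  induction cols with
  | nil =>
    intro run
    by_cases h : run.isEmpty <;> simp_all [pvG, List.splitOnP_nil, List.isEmpty_iff]
  | cons c cs ih =>
    intro run
    by_cases hc : pvAllSpace c = true
    · have h0 := ih []
      rw [pvModifyHead_nil] at h0
      by_cases h : run.isEmpty
      · have : run = [] := List.isEmpty_iff.mp h
        subst this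
        simp [pvG, hc, h0]
      · simp [pvG, hc, h, h0]
    · simp only [pvG, hc, Bool.false_eq_true, if_false]
      rw [ih (run ++ [c])]
      simp only [List.splitOnP_cons, hc, Bool.false_eq_true, if_false, pvModifyHead_comp]
      congr 2
      funext g
      simp

lemma pvG_nil_split (cols : List String) :
    pvG [] cols = (cols.splitOnP pvAllSpace).filter (fun g => !g.isEmpty) := by
  rw [pvG_split cols [], pvModifyHead_nil]

-- B-side helpers: blank-column index list and the slice-between-bounds computation
def pvSepIdx (cols : List String) : List Int :=
  ((PySem.List.enumerate cols 0).filter (fun p => pvAllSpace p.2)).map (fun p => p.1)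

def pvMfs (cols : List String) (P : List (Int × Int)) : List (List String) :=
  (P.filter (fun p => decide (p.2 - p.1 > 1))).map
    (fun p => PySem.List.slice cols (some (p.1 + 1)) (some p.2))

def pvSh (p : Int × Int) : Int × Int := (p.1 + 1, p.2 + 1)

lemma pvEnumerate_shift {α : Type} (xs : List α) (s : Int) :
    PySem.List.enumerate xs (s + 1) = (PySem.List.enumerate xs s).map (fun p => (p.1 + 1, p.2)) := by
  induction xs generalizing s with
  | nil => simp [PySem.List.enumerate_nil]
  | cons x xs ih =>
    rw [PySem.List.enumerate_cons, PySem.List.enumerate_cons]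
    have := ih (s + 1)
    simp only [List.map_cons]
    rw [show s + 1 + 1 = (s + 1) + 1 from rfl, this]

lemma pvSepIdx_nil : pvSepIdx [] = [] := by
  simp [pvSepIdx, PySem.List.enumerate_nil]

lemma pvSepIdx_cons (c : String) (cs : List String) :
    pvSepIdx (c :: cs) =
      (if pvAllSpace c then [(0 : Int)] else []) ++ (pvSepIdx cs).map (· + 1) := by
  unfold pvSepIdx
  rw [PySem.List.enumerate_cons, show (0 : Int) + 1 = 0 + 1 from rfl, pvEnumerate_shift]
  rw [List.filter_cons]
  by_cases hc : pvAllSpace c = true <;>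
    simp [hc, List.filter_map, List.map_map, Function.comp_def]

lemma pvSepIdx_nonneg (cols : List String) : ∀ x ∈ pvSepIdx cols, 0 ≤ x := by
  induction cols with
  | nil => simp [pvSepIdx_nil]
  | cons c cs ih =>
    intro x hx
    rw [pvSepIdx_cons] at hx
    rcases List.mem_append.mp hx with h | h
    · by_cases hc : pvAllSpace c = true
      · simp [hc] at h; omega
      · simp [hc] at h
    · obtain ⟨y, hy, rfl⟩ := List.mem_map.mp h
      have := ih y hy; omega

lemma pvSlice_cons_shift (c : String) (cs : List String) (a b : Int) (ha : 0 ≤ a) (hb : 0 ≤ b) :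
    PySem.List.slice (c :: cs) (some (a + 1)) (some (b + 1)) =
      PySem.List.slice cs (some a) (some b) := by
  rw [PySem.List.slice_toNat _ (by omega) (by omega),
      PySem.List.slice_toNat _ ha hb]
  have h1 : (a + 1).toNat = a.toNat + 1 := by omega
  have h2 : (b + 1).toNat = b.toNat + 1 := by omega
  simp [h1, h2]

lemma pvMfs_shift (c : String) (cs : List String) (P : List (Int × Int))
    (h : ∀ p ∈ P, -1 ≤ p.1 ∧ 0 ≤ p.2) :
    pvMfs (c :: cs) (P.map pvSh) = pvMfs cs P := by
  induction P with
  | nil => simp [pvMfs]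
  | cons q Q ih =>
    obtain ⟨h1, h2⟩ := h q (List.mem_cons_self)
    have hrest : ∀ p ∈ Q, -1 ≤ p.1 ∧ 0 ≤ p.2 := fun p hp => h p (List.mem_cons_of_mem _ hp)
    unfold pvMfs at *
    simp only [List.map_cons, List.filter_cons, pvSh]
    rw [show q.2 + 1 - (q.1 + 1) = q.2 - q.1 from by ring]
    by_cases hq : q.2 - q.1 > 1
    · simp only [hq, decide_true, if_pos, List.map_cons]
      rw [ih hrest]
      congr 1
      exact pvSlice_cons_shift c cs (q.1 + 1) q.2 (by omega) h2
    · simp only [hq, decide_false, Bool.false_eq_true, if_false]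
      exact ih hrest

lemma pvZip_map_sh (l m : List Int) :
    List.zip (l.map (· + 1)) (m.map (· + 1)) = (List.zip l m).map pvSh := by
  rw [List.zip_map]
  rfl

lemma pvB_main (cols : List String) :
    (pvMfs cols (List.zip ((-1) :: pvSepIdx cols) (pvSepIdx cols ++ [(cols.length : Int)]))
       = (cols.splitOnP pvAllSpace).filter (fun g => !g.isEmpty))
  ∧ (pvMfs cols (List.zip (pvSepIdx cols) ((pvSepIdx cols ++ [(cols.length : Int)]).tail))
       = ((cols.splitOnP pvAllSpace).tail).filter (fun g => !g.isEmpty))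
  ∧ ((cols.splitOnP pvAllSpace).headI
       = cols.take ((pvSepIdx cols ++ [(cols.length : Int)]).headI.toNat)) := by
  induction cols with
  | nil =>
    refine ⟨?_, ?_, ?_⟩ <;> simp [pvSepIdx_nil, pvMfs, List.splitOnP_nil]
  | cons c cs ih =>
    obtain ⟨ihA, ihB, ihC⟩ := ih
    have hnn : ∀ x ∈ pvSepIdx cs ++ [(cs.length : Int)], 0 ≤ x := by
      intro x hx
      rcases List.mem_append.mp hx with h | h
      · exact pvSepIdx_nonneg cs x h
      · simp at h; omega
    have hshiftL : ((-1 : Int) :: pvSepIdx cs).map (· + 1) = 0 :: (pvSepIdx cs).map (· + 1) := by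
      simp
    have hshiftR : (pvSepIdx cs ++ [(cs.length : Int)]).map (· + 1)
        = (pvSepIdx cs).map (· + 1) ++ [((c :: cs).length : Int)] := by
      simp
    have hbound : ∀ p ∈ List.zip ((-1) :: pvSepIdx cs) (pvSepIdx cs ++ [(cs.length : Int)]),
        -1 ≤ p.1 ∧ 0 ≤ p.2 := by
      intro p hp
      obtain ⟨hp1, hp2⟩ := List.of_mem_zip hp
      constructor
      · rcases List.mem_cons.mp hp1 with h | h
        · omega
        · have := pvSepIdx_nonneg cs p.1 h; omega
      · exact hnn p.2 hp2
    have hzipfull : List.zip (((-1) :: pvSepIdx cs).map (· + 1))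
          ((pvSepIdx cs ++ [(cs.length : Int)]).map (· + 1))
        = (List.zip ((-1) :: pvSepIdx cs) (pvSepIdx cs ++ [(cs.length : Int)])).map pvSh :=
      pvZip_map_sh _ _
    by_cases hc : pvAllSpace c = true
    · -- blank column: the zipped bounds over c::cs are the shifted bounds over cs, plus (-1,0) in front
      have hS : pvSepIdx (c :: cs) = 0 :: (pvSepIdx cs).map (· + 1) := by
        simp [pvSepIdx_cons, hc]
      have hA : pvMfs (c :: cs) (List.zip (0 :: (pvSepIdx cs).map (· + 1))
            ((pvSepIdx cs).map (· + 1) ++ [((c :: cs).length : Int)]))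
          = (cs.splitOnP pvAllSpace).filter (fun g => !g.isEmpty) := by
        rw [← hshiftR, ← hshiftL, hzipfull, pvMfs_shift c cs _ hbound, ihA]
      refine ⟨?_, ?_, ?_⟩
      · rw [hS]
        have : List.zip ((-1) :: 0 :: (pvSepIdx cs).map (· + 1))
              ((0 :: (pvSepIdx cs).map (· + 1)) ++ [((c :: cs).length : Int)])
            = (-1, 0) :: List.zip (0 :: (pvSepIdx cs).map (· + 1))
              ((pvSepIdx cs).map (· + 1) ++ [((c :: cs).length : Int)]) := by
          simp
        rw [this]
        unfold pvMfs
        rw [List.filter_cons]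
        simp only [show ¬((0 : Int) - (-1) > 1) from by omega, decide_false,
          Bool.false_eq_true, if_false]
        rw [show ((P : List (Int × Int)) → (P.filter (fun p => decide (p.2 - p.1 > 1))).map
          (fun p => PySem.List.slice (c :: cs) (some (p.1 + 1)) (some p.2)) = pvMfs (c :: cs) P)
          from fun P => rfl, hA]
        simp [hc]
      · rw [hS]
        simp only [List.cons_append, List.tail_cons]
        rw [hA]
        simp [hc]
      · rw [hS]
        simp [hc, List.splitOnP_cons]
    · -- non-blank column: the first slice is c consed onto the head chunk of cs
      have hS : pvSepIdx (c :: cs) = (pvSepIdx cs).map (· + 1) := by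
        simp [pvSepIdx_cons, hc]
      obtain ⟨h', t, hst⟩ : ∃ h' t, pvSepIdx cs ++ [(cs.length : Int)] = h' :: t := by
        cases pvSepIdx cs <;> exact ⟨_, _, rfl⟩
      have hh' : 0 ≤ h' := hnn h' (hst ▸ List.mem_cons_self)
      have ht : ∀ x ∈ t, 0 ≤ x := fun x hx => hnn x (hst ▸ List.mem_cons_of_mem _ hx)
      obtain ⟨g0, gs, hsp⟩ : ∃ g0 gs, cs.splitOnP pvAllSpace = g0 :: gs := by
        rcases h : cs.splitOnP pvAllSpace with _ | ⟨g0, gs⟩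
        · exact absurd h (List.splitOnP_ne_nil _ _)
        · exact ⟨g0, gs, rfl⟩
      have hg0 : g0 = cs.take h'.toNat := by
        have := ihC
        rw [hsp, hst] at this
        simpa using this
      have hzt : List.zip ((pvSepIdx cs).map (· + 1)) (t.map (· + 1))
          = (List.zip (pvSepIdx cs) t).map pvSh := pvZip_map_sh _ _
      have hboundt : ∀ p ∈ List.zip (pvSepIdx cs) t, -1 ≤ p.1 ∧ 0 ≤ p.2 := by
        intro p hp
        obtain ⟨hp1, hp2⟩ := List.of_mem_zip hp
        exact ⟨by have := pvSepIdx_nonneg cs p.1 hp1; omega, ht p.2 hp2⟩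
      have htail : pvMfs (c :: cs) (List.zip ((pvSepIdx cs).map (· + 1)) (t.map (· + 1)))
          = (gs.filter (fun g => !g.isEmpty)) := by
        rw [hzt, pvMfs_shift c cs _ hboundt]
        have := ihB
        rw [hst, hsp] at this
        simpa using this
      have hsplit : (c :: cs).splitOnP pvAllSpace = (c :: g0) :: gs := by
        simp [List.splitOnP_cons, hc, hsp]
      have hmapR : pvSepIdx (c :: cs) ++ [((c :: cs).length : Int)]
          = (h' + 1) :: t.map (· + 1) := by
        rw [hS, ← hshiftR, hst]
        simp
      refine ⟨?_, ?_, ?_⟩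
      · rw [hmapR, hS]
        have : List.zip ((-1) :: (pvSepIdx cs).map (· + 1)) ((h' + 1) :: t.map (· + 1))
            = (-1, h' + 1) :: List.zip ((pvSepIdx cs).map (· + 1)) (t.map (· + 1)) := by
          simp
        rw [this]
        unfold pvMfs
        rw [List.filter_cons]
        simp only [show ((h' : Int) + 1 - (-1) > 1) from by omega, decide_true, if_pos,
          List.map_cons]
        rw [show ((P : List (Int × Int)) → (P.filter (fun p => decide (p.2 - p.1 > 1))).map
          (fun p => PySem.List.slice (c :: cs) (some (p.1 + 1)) (some p.2)) = pvMfs (c :: cs) P)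
          from fun P => rfl, htail]
        rw [hsplit]
        have hslice : PySem.List.slice (c :: cs) (some ((-1 : Int) + 1)) (some (h' + 1))
            = c :: cs.take h'.toNat := by
          rw [show ((-1 : Int) + 1) = 0 from rfl,
            PySem.List.slice_toNat _ (by omega) (by omega)]
          have h1 : ((h' : Int) + 1).toNat = h'.toNat + 1 := by omega
          simp [h1]
        rw [hslice, List.filter_cons]
        simp [hg0]
      · rw [hmapR, hS]
        simp only [List.tail_cons]
        rw [htail, hsplit]
        simp
      · rw [hsplit, hmapR]
        simp only [List.headI]
        have h1 : ((h' : Int) + 1).toNat = h'.toNat + 1 := by omega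
        simp [h1, hg0]

lemma pvLjust_getD (n i : Nat) (l : List Char) :
    (pvLjust n l).getD i ' ' = if i < l.length then l.getD i ' ' else ' ' := by
  unfold pvLjust
  by_cases h : i < l.length
  · simp [List.getD, List.getElem?_append_left h, h]
  · simp only [h, if_false, List.getD]
    rw [List.getElem?_append_right (by omega)]
    simp only [List.getElem?_replicate]
    split <;> rfl

-- ===== VERDICT (by name: the statement is the Claim_ definition above) =====
theorem parse_problems_from_transposed_spec : Claim_equal_parse_problems_from_transposed := by
  intro lines _ _
  unfold Spec_parse_problems_from_transposed parse_problems_from_transposed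
    parse_problems_from_transposed_alt
  simp only []
  set maxlen := ((lines.map (fun l => l.toList.length)).max?).getD 0 with hm
  have hcols : (List.range maxlen).map
      (fun i => String.ofList ((lines.map (fun l => pvLjust maxlen l.toList)).map (fun row => row.getD i ' ')))
    = (List.range maxlen).map
      (fun i => String.ofList (lines.map (fun l => if i < l.toList.length then l.toList.getD i ' ' else ' '))) := by
    apply List.map_congr_left
    intro i _
    congr 1
    rw [List.map_map]
    apply List.map_congr_left
    intro l _
    exact pvLjust_getD _ i l.toList
  rw [hcols]
  set columns := (List.range maxlen).map
      (fun i => String.ofList (lines.map (fun l => if i < l.toList.length then l.toList.getD i ' ' else ' '))) with hcdef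
  have hlen : (columns.length : Int) = (maxlen : Int) := by
    simp [hcdef]
  rw [pvLoopA_eq_pvG, pvG_nil_split]
  rw [show ((((PySem.List.enumerate columns 0).filter (fun p => pvAllSpace p.2)).map (fun p => p.1)))
      = pvSepIdx columns from rfl]
  rw [← hlen]
  exact ((pvB_main columns).1).symm
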